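-- pv_equiv track=rewrite | github.com/sayyidmaulana/praxis-academy | praxis-academy/novice/04-05/latihan/coba.py | kiri
-- ===== SOURCE A (Python) =====
-- def kiri(i, n):
-- # for i in range (0, n):
--     a = ""
--     for j in range(i, n):
--         if i == 0:
--             a += "*"
--         elif j > i:
--             a += " "
--         else:
--             a += "*"
--     return a
-- ===== SOURCE B (Python) =====
-- def kiri(i, n):
--     m = n - i
--     if m <= 0:
--         return ""
--     if i == 0:
--         return "*" * m
--     return "*" + " " * (m - 1)
-- ===== Notes on version B (the rewrite author's own statement) =====
-- stated objective: simpler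
-- what changed: Replaces the per-character loop with direct string construction: the row length n-i is computed once and the string is built by repetition ('*'*m, or '*' followed by m-1 spaces).
import Mathlib
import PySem

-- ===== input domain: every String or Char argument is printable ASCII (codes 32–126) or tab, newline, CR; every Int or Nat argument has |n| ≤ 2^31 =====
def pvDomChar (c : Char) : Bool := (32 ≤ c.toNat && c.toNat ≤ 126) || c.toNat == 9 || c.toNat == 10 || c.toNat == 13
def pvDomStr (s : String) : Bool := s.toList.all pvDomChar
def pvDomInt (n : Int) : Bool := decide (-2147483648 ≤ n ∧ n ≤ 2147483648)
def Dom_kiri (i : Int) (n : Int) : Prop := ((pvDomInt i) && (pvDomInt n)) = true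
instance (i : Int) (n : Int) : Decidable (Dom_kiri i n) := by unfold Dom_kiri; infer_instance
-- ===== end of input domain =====

-- B builds the row by repetition instead of appending one character at a time (return value only; simpler, not faster).

-- ===== PORT A =====
def kiri (i : Int) (n : Int) : String :=
  (PySem.List.pyRange i n 1).foldl
    (fun a j => if i = 0 then a ++ "*" else if j > i then a ++ " " else a ++ "*") ""

-- ===== PORT B =====
def kiri_alt (i : Int) (n : Int) : String :=
  let m := n - i
  if m ≤ 0 then ""
  else if i = 0 then String.ofList (List.replicate m.toNat '*')
  else String.ofList ('*' :: List.replicate (m - 1).toNat ' ')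

-- ===== PRECONDITION & SPEC =====
def Spec_kiri (i : Int) (n : Int) (out : String) : Prop := out = kiri_alt i n
instance (i : Int) (n : Int) (out : String) : Decidable (Spec_kiri i n out) := by unfold Spec_kiri; infer_instance

-- ===== CLAIM (what is proved, stated in full; the proofs are below) =====
def Claim_equal_kiri : Prop := ∀ (i : Int) (n : Int), Dom_kiri i n → Spec_kiri i n (kiri i n)

-- ===== LEMMAS AND PROOFS =====

theorem foldl_const_char (l : List Int) (c : Char) (s : String)
    (f : String → Int → String) (hf : ∀ a j, j ∈ l → f a j = a ++ String.ofList [c]) :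
    l.foldl f s = s ++ String.ofList (List.replicate l.length c) := by
  induction l generalizing s with
  | nil =>
    apply String.ext
    simp
  | cons x t ih =>
    simp only [List.foldl_cons, List.length_cons]
    rw [hf s x (by simp), ih _ (fun a j hj => hf a j (List.mem_cons_of_mem _ hj))]
    apply String.ext
    simp [List.replicate_succ]

theorem kiri_spec_aux (i n : Int) : kiri i n = kiri_alt i n := by
  unfold kiri kiri_alt
  by_cases hle : n - i ≤ 0
  · rw [PySem.List.pyRange_one_eq_nil (by omega)]
    simp [hle]
  · simp only [if_neg hle]
    by_cases hi : i = 0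
    · rw [foldl_const_char _ '*' _ _ (fun a j _ => by simp [hi])]
      simp [PySem.List.length_pyRange_one, hi]
    · rw [PySem.List.pyRange_one_cons (by omega)]
      simp only [List.foldl_cons, if_neg hi, lt_irrefl]
      rw [foldl_const_char _ ' ' _ _ (fun a j hj => by
        have : i < j := (PySem.List.mem_pyRange_one.mp hj).1
        simp [this])]
      have h1 : (PySem.List.pyRange (i+1) n 1).length = (n - i - 1).toNat := by
        rw [PySem.List.length_pyRange_one]; omega
      rw [h1]
      apply String.ext
      simp

-- ===== VERDICT (by name: the statement is the Claim_ definition above) =====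
theorem kiri_spec : Claim_equal_kiri := by
  intro i n _
  exact kiri_spec_aux i n
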